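-- pv_equiv track=rewrite | github.com/clementgabas/ENSAI_ProjetInfo_2A | AppClient/Player/travailMDP/testmdp.py | anti_SQl_injection
-- ===== SOURCE A (Python) =====
-- def anti_SQl_injection(text):
--     copy_text = text
--     for lettre in text:
--         if lettre in (";", "\n", "\r", "\,", "',", "\x00", "\x1a", ):
--             text = text.replace(lettre, "")
--     text = text.replace("'", "''")
--     text = text.replace("--", "")
--     text = text.replace("NUL", "")
--
--     if text!=copy_text:
--         return False
--     return True
-- ===== SOURCE B (Python) =====
-- def anti_SQl_injection(text):
--     # one forward scan for forbidden single chars, plus two substring checks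
--     if any(c in ";\n\r\x00\x1a'" for c in text):
--         return False
--     return "--" not in text and "NUL" not in text
-- ===== Notes on version B (the rewrite author's own statement) =====
-- stated objective: faster
-- what changed: Replaces A's mutate-and-compare (several str.replace passes building a modified copy, then an inequality test) with a direct single scan for the forbidden characters plus two substring membership tests; the two-character tuple entries of A never equal a single character, so they need no test.
import Mathlib
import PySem

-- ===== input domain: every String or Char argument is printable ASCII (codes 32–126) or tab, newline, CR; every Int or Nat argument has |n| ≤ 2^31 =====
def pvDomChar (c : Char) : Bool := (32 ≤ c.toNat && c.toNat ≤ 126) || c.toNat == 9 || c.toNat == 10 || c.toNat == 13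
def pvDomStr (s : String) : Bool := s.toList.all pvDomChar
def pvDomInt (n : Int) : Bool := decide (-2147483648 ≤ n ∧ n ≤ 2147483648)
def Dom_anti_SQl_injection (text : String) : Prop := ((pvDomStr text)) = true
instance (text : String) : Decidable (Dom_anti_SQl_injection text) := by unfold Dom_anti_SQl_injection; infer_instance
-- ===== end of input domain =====

-- B replaces A's mutate-and-compare (several str.replace passes, then an inequality test) by one
-- direct scan for the forbidden characters plus two substring tests; same boolean on every string.

-- ===== PORT A =====
def anti_SQl_injection (text : String) : Bool :=
  let copy_text := text
  let text := text.toList.foldl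
    (fun t lettre =>
      if String.singleton lettre = ";" ∨ String.singleton lettre = "\n" ∨
         String.singleton lettre = "\r" ∨ String.singleton lettre = "\\," ∨
         String.singleton lettre = "'," ∨ String.singleton lettre = "\x00" ∨
         String.singleton lettre = "\x1a"
      then PySem.Str.replace t (String.singleton lettre) ""
      else t) text
  let text := PySem.Str.replace text "'" "''"
  let text := PySem.Str.replace text "--" ""
  let text := PySem.Str.replace text "NUL" ""
  if text ≠ copy_text then false else true

-- ===== PORT B =====
def anti_SQl_injection_alt (text : String) : Bool :=
  if text.toList.any (fun c => PySem.Str.isIn (String.singleton c) ";\n\r\x00\x1a'") then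
    false
  else
    !(PySem.Str.isIn "--" text) && !(PySem.Str.isIn "NUL" text)

-- ===== PRECONDITION & SPEC =====
def Spec_anti_SQl_injection (text : String) (out : Bool) : Prop := out = anti_SQl_injection_alt text
instance (text : String) (out : Bool) : Decidable (Spec_anti_SQl_injection text out) := by unfold Spec_anti_SQl_injection; infer_instance

-- ===== CLAIM (what is proved, stated in full; the proofs are below) =====
def Claim_equal_anti_SQl_injection : Prop := ∀ (text : String), Dom_anti_SQl_injection text → Spec_anti_SQl_injection text (anti_SQl_injection text)

-- ===== LEMMAS AND PROOFS =====

/-- Structural specification of `PySem.Chars.replace` for a nonempty pattern. -/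
def repSpec (old new : List Char) : List Char → List Char
  | [] => []
  | c :: t =>
    if old.isPrefixOf (c :: t) then new ++ repSpec old new (t.drop (old.length - 1))
    else c :: repSpec old new t
termination_by l => l.length
decreasing_by
  all_goals simp [List.length_drop]

theorem go_eq (old new : List Char) (hold : old ≠ []) :
    ∀ (fuel : Nat) (l acc : List Char), l.length ≤ fuel →
      PySem.Chars.replace.go old new fuel l acc = acc.reverse ++ repSpec old new l := by
  intro fuel
  induction fuel with
  | zero =>
    intro l acc h
    have : l = [] := List.eq_nil_of_length_eq_zero (by omega)
    subst this
    rw [PySem.Chars.replace.go, repSpec]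
  | succ n ih =>
    intro l acc h
    match l with
    | [] =>
      rw [PySem.Chars.replace.go, repSpec] <;> simp
    | c :: t =>
      have ht : t.length ≤ n := by simp at h; omega
      rw [PySem.Chars.replace.go]
      by_cases hp : old.isPrefixOf (c :: t)
      · simp only [hp, if_true]
        have hlen : old.length ≥ 1 := by cases old <;> simp_all
        have hd : (c :: t).drop old.length = t.drop (old.length - 1) := by
          cases old with
          | nil => simp_all
          | cons o os => simp
        have hlen2 : (t.drop (old.length - 1)).length ≤ n := by
          simp only [List.length_drop]; omega
        rw [hd, ih _ _ hlen2, repSpec]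
        simp [hp]
      · simp only [hp, if_false]
        rw [ih _ _ ht, repSpec]
        simp [hp]

theorem replace_eq_repSpec (l old new : List Char) (hold : old ≠ []) :
    PySem.Chars.replace l old new = repSpec old new l := by
  rw [PySem.Chars.replace]
  have h1 : old.isEmpty = false := by simp [hold]
  rw [h1]
  simpa using go_eq old new hold l.length l [] (le_refl _)

theorem repSpec_of_not_infix (old new : List Char) (l : List Char) (h : ¬ old <:+: l) :
    repSpec old new l = l := by
  induction l with
  | nil => rw [repSpec]
  | cons c t ih =>
    rw [repSpec]
    have hp : ¬ old.isPrefixOf (c :: t) := by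
      intro hp
      exact h ((List.isPrefixOf_iff_prefix.mp hp).isInfix)
    rw [if_neg hp, ih (fun hi => h (List.infix_cons_iff.mpr (Or.inr hi)))]

theorem mem_repSpec (old new l : List Char) (x : Char) (h : x ∈ repSpec old new l) :
    x ∈ l ∨ x ∈ new := by
  induction l using repSpec.induct old with
  | case1 => simp [repSpec] at h
  | case2 c t hp ih =>
    rw [repSpec, if_pos hp] at h
    rcases List.mem_append.mp h with h1 | h1
    · exact Or.inr h1
    · rcases ih h1 with h2 | h2
      · exact Or.inl (List.mem_cons_of_mem c (List.mem_of_mem_drop h2))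
      · exact Or.inr h2
  | case3 c t hp ih =>
    rw [repSpec, if_neg hp] at h
    rcases List.mem_cons.mp h with h1 | h1
    · exact Or.inl (by simp [h1])
    · rcases ih h1 with h2 | h2
      · exact Or.inl (List.mem_cons_of_mem c h2)
      · exact Or.inr h2

theorem length_repSpec_le (old l : List Char) : (repSpec old [] l).length ≤ l.length := by
  induction l using repSpec.induct old with
  | case1 => simp [repSpec]
  | case2 c t hp ih =>
    rw [repSpec, if_pos hp]
    simp only [List.nil_append]
    simp [List.length_drop] at *
    omega
  | case3 c t hp ih =>
    rw [repSpec, if_neg hp]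
    simpa using Nat.succ_le_succ ih

theorem length_repSpec_lt (old l : List Char) (hold : old ≠ []) (h : old <:+: l) :
    (repSpec old [] l).length < l.length := by
  induction l using repSpec.induct old with
  | case1 => exact absurd (List.eq_nil_of_infix_nil h) hold
  | case2 c t hp ih =>
    rw [repSpec, if_pos hp]
    simp only [List.nil_append]
    have h1 := length_repSpec_le old (t.drop (old.length - 1))
    have h2 : old.length ≥ 1 := by cases old <;> simp_all
    simp [List.length_drop] at *
    omega
  | case3 c t hp ih =>
    rw [repSpec, if_neg hp]
    have ht : old <:+: t := by
      rcases List.infix_cons_iff.mp h with h1 | h1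
      · exact absurd (List.isPrefixOf_iff_prefix.mpr h1) hp
      · exact h1
    simpa using Nat.succ_lt_succ (ih ht)

theorem repSpec_singleton (c : Char) (new l : List Char) :
    repSpec [c] new l = l.flatMap (fun x => if x = c then new else [x]) := by
  induction l with
  | nil => rw [repSpec]; simp
  | cons x t ih =>
    rw [repSpec]
    by_cases hx : x = c
    · subst hx
      have hp : [x].isPrefixOf (x :: t) := by simp [List.isPrefixOf_iff_prefix]
      simp [hp, ih]
    · have hp : ¬ [c].isPrefixOf (x :: t) := by
        simp [List.isPrefixOf_iff_prefix, List.cons_prefix_cons]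
        intro h; exact absurd h.symm hx
      simp [hp, hx, ih]

theorem count_repSpec_eq (old new l : List Char) (c : Char) (hold : old ≠ [])
    (h1 : c ∉ old) (h2 : c ∉ new) :
    (repSpec old new l).count c = l.count c := by
  induction l using repSpec.induct old with
  | case1 => rw [repSpec]
  | case2 x t hp ih =>
    rw [repSpec, if_pos hp]
    obtain ⟨rest, hr⟩ := List.isPrefixOf_iff_prefix.mp hp
    have hko : old.length ≥ 1 := by cases old <;> simp_all
    have hdrop : t.drop (old.length - 1) = rest := by
      have : (x :: t).drop old.length = rest := by rw [← hr, List.drop_left]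
      rw [← this]
      cases old with
      | nil => simp_all
      | cons o os => simp
    rw [List.count_append, ih, hdrop]
    have : (x :: t).count c = old.count c + rest.count c := by
      rw [← hr, List.count_append]
    rw [this, List.count_eq_zero.mpr h1, List.count_eq_zero.mpr h2]
  | case3 x t hp ih =>
    rw [repSpec, if_neg hp]
    simp [List.count_cons, ih]

theorem count_flatMap_double (c : Char) (l : List Char) :
    (l.flatMap (fun x => if x = c then [c, c] else [x])).count c = 2 * l.count c := by
  induction l with
  | nil => simp
  | cons x t ih =>
    by_cases hx : x = c
    · subst hx; simp [List.count_cons, ih]; omega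
    · simp [hx, List.count_cons, ih]

/-- The five characters A's loop actually removes. -/
def badFive : List Char := [';', '\n', '\r', Char.ofNat 0, Char.ofNat 26]

/-- The characters B scans for (the five plus the single quote). -/
def badSix : List Char := [';', '\n', '\r', Char.ofNat 0, Char.ofNat 26, '\'']

theorem cond_iff (c : Char) :
    (String.singleton c = ";" ∨ String.singleton c = "\n" ∨
     String.singleton c = "\r" ∨ String.singleton c = "\\," ∨
     String.singleton c = "'," ∨ String.singleton c = "\x00" ∨
     String.singleton c = "\x1a") ↔ c ∈ badFive := by
  have e1 : (";" : String).toList = [';'] := by decide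
  have e2 : ("\n" : String).toList = ['\n'] := by decide
  have e3 : ("\r" : String).toList = ['\r'] := by decide
  have e4 : ("\\," : String).toList = ['\\', ','] := by decide
  have e5 : ("'," : String).toList = ['\'', ','] := by decide
  have e6 : ("\x00" : String).toList = [Char.ofNat 0] := by decide
  have e7 : ("\x1a" : String).toList = [Char.ofNat 26] := by decide
  simp only [String.ext_iff, String.toList_singleton, e1, e2, e3, e4, e5, e6, e7, badFive]
  simp

/-- List-level version of A's loop body. -/
def stepL (t : List Char) (c : Char) : List Char :=
  if c ∈ badFive then PySem.Chars.replace t [c] [] else t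

theorem foldl_bridge (cs : List Char) :
    ∀ (t : String),
      (cs.foldl
        (fun t lettre =>
          if String.singleton lettre = ";" ∨ String.singleton lettre = "\n" ∨
             String.singleton lettre = "\r" ∨ String.singleton lettre = "\\," ∨
             String.singleton lettre = "'," ∨ String.singleton lettre = "\x00" ∨
             String.singleton lettre = "\x1a"
          then PySem.Str.replace t (String.singleton lettre) ""
          else t) t).toList = cs.foldl stepL t.toList := by
  induction cs with
  | nil => intro t; simp
  | cons c cs ih =>
    intro t
    rw [List.foldl_cons, List.foldl_cons, ih]
    congr 1
    by_cases hc : c ∈ badFive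
    · rw [if_pos ((cond_iff c).mpr hc)]
      rw [stepL, if_pos hc, PySem.Str.toList_replace, String.toList_singleton]
      congr 1
    · rw [if_neg (fun h => hc ((cond_iff c).mp h)), stepL, if_neg hc]

theorem stepL_subset (l : List Char) (c x : Char) (h : x ∈ stepL l c) : x ∈ l := by
  rw [stepL] at h
  split at h
  · rw [replace_eq_repSpec _ _ _ (by simp)] at h
    rcases mem_repSpec _ _ _ _ h with h1 | h1
    · exact h1
    · simp at h1
  · exact h

theorem foldl_stepL_subset (cs : List Char) :
    ∀ (l : List Char) (x : Char), x ∈ cs.foldl stepL l → x ∈ l := by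
  induction cs with
  | nil => intro l x h; simpa using h
  | cons c cs ih =>
    intro l x h
    exact stepL_subset l c x (ih (stepL l c) x h)

theorem foldl_stepL_id (cs : List Char) (l : List Char) (h : ∀ c ∈ cs, c ∉ badFive) :
    cs.foldl stepL l = l := by
  induction cs generalizing l with
  | nil => rfl
  | cons c cs ih =>
    rw [List.foldl_cons, stepL, if_neg (h c (by simp))]
    exact ih l (fun d hd => h d (by simp [hd]))

theorem foldl_stepL_removes (cs : List Char) :
    ∀ (l : List Char) (c0 : Char), c0 ∈ cs → c0 ∈ badFive → c0 ∉ cs.foldl stepL l := by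
  induction cs with
  | nil => intro l c0 h; simp at h
  | cons c cs ih =>
    intro l c0 hmem hbad
    rcases List.mem_cons.mp hmem with heq | hmem'
    · subst heq
      intro habs
      have h2 : c0 ∈ stepL l c0 := foldl_stepL_subset cs (stepL l c0) c0 habs
      rw [stepL, if_pos hbad, replace_eq_repSpec _ _ _ (by simp), repSpec_singleton] at h2
      simp [List.mem_flatMap] at h2
    · exact ih (stepL l c) c0 hmem' hbad

/-- The full A-side pipeline, at the list level. -/
def chainL (l : List Char) : List Char :=
  repSpec ['N', 'U', 'L'] []
    (repSpec ['-', '-'] []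
      (repSpec ['\''] ['\'', '\''] (l.foldl stepL l)))

theorem A_iff (text : String) :
    anti_SQl_injection text = true ↔ chainL text.toList = text.toList := by
  have E : (PySem.Str.replace (PySem.Str.replace (PySem.Str.replace
      (text.toList.foldl
        (fun t lettre =>
          if String.singleton lettre = ";" ∨ String.singleton lettre = "\n" ∨
             String.singleton lettre = "\r" ∨ String.singleton lettre = "\\," ∨
             String.singleton lettre = "'," ∨ String.singleton lettre = "\x00" ∨
             String.singleton lettre = "\x1a"
          then PySem.Str.replace t (String.singleton lettre) ""
          else t) text) "'" "''") "--" "") "NUL" "").toList = chainL text.toList := by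
    have eq1 : ("'" : String).toList = ['\''] := by decide
    have eq2 : ("''" : String).toList = ['\'', '\''] := by decide
    have eq3 : ("--" : String).toList = ['-', '-'] := by decide
    have eq4 : ("NUL" : String).toList = ['N', 'U', 'L'] := by decide
    have eq0 : ("" : String).toList = [] := by decide
    rw [chainL, PySem.Str.toList_replace, PySem.Str.toList_replace, PySem.Str.toList_replace,
        eq0, eq1, eq2, eq3, eq4, foldl_bridge,
        replace_eq_repSpec _ _ _ (by simp), replace_eq_repSpec _ _ _ (by simp),
        replace_eq_repSpec _ _ _ (by simp)]
  simp only [anti_SQl_injection]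
  split_ifs with h
  · simp only [Bool.false_eq_true, false_iff]
    intro hc
    exact h (String.ext_iff.mpr (by rw [E]; exact hc))
  · simp only [true_iff]
    rw [← E]
    exact congrArg String.toList (not_not.mp (by simpa using h))

theorem B_iff (text : String) :
    anti_SQl_injection_alt text = true ↔
      ((∀ c ∈ text.toList, c ∉ badSix) ∧
        ¬ (['-', '-'] <:+: text.toList) ∧ ¬ (['N', 'U', 'L'] <:+: text.toList)) := by
  have ebad : (";\n\r\x00\x1a'" : String).toList = badSix := by decide
  have hscan : ∀ c : Char,
      (PySem.Str.isIn (String.singleton c) ";\n\r\x00\x1a'" = true) ↔ c ∈ badSix := by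
    intro c
    rw [PySem.Str.isIn_iff_infix, String.toList_singleton, ebad, List.singleton_infix_iff]
  have edd : ("--" : String).toList = ['-', '-'] := by decide
  have enul : ("NUL" : String).toList = ['N', 'U', 'L'] := by decide
  rw [anti_SQl_injection_alt]
  split_ifs with h
  · simp only [Bool.false_eq_true, false_iff]
    intro hcl
    simp only [List.any_eq_true] at h
    obtain ⟨c, hcl', hc⟩ := h
    exact hcl.1 c hcl' ((hscan c).mp hc)
  · simp only [List.any_eq_true, not_exists] at h
    have h' : ∀ c ∈ text.toList, c ∉ badSix := fun c hc hm => (h c) ⟨hc, (hscan c).mpr hm⟩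
    have sdd : PySem.Str.isIn "--" text = false ↔ ¬ (['-', '-'] <:+: text.toList) := by
      rw [Bool.eq_false_iff, Ne, PySem.Str.isIn_iff_infix, edd]
    have snul : PySem.Str.isIn "NUL" text = false ↔ ¬ (['N', 'U', 'L'] <:+: text.toList) := by
      rw [Bool.eq_false_iff, Ne, PySem.Str.isIn_iff_infix, enul]
    rw [Bool.and_eq_true, Bool.not_eq_true', Bool.not_eq_true', sdd, snul]
    constructor
    · rintro ⟨b1, b2⟩; exact ⟨h', b1, b2⟩
    · rintro ⟨_, b1, b2⟩; exact ⟨b1, b2⟩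

theorem badFive_sub (c : Char) (h : c ∈ badFive) : c ∈ badSix := by
  simp only [badFive, badSix, List.mem_cons] at *
  tauto

theorem chain_eq (l : List Char) (h1 : ∀ c ∈ l, c ∉ badSix)
    (h2 : ¬ (['-', '-'] <:+: l)) (h3 : ¬ (['N', 'U', 'L'] <:+: l)) :
    chainL l = l := by
  rw [chainL, foldl_stepL_id l l (fun c hc hb => h1 c hc (badFive_sub c hb))]
  rw [repSpec_of_not_infix ['\''] ['\'', '\''] l (by
    rw [List.singleton_infix_iff]
    exact fun hm => h1 _ hm (by simp [badSix]))]
  rw [repSpec_of_not_infix ['-', '-'] [] l h2, repSpec_of_not_infix ['N', 'U', 'L'] [] l h3]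

theorem chain_ne (l : List Char)
    (h : ¬ ((∀ c ∈ l, c ∉ badSix) ∧ ¬ (['-', '-'] <:+: l) ∧ ¬ (['N', 'U', 'L'] <:+: l))) :
    chainL l ≠ l := by
  by_cases hb5 : ∃ c ∈ l, c ∈ badFive
  · obtain ⟨c0, hc0l, hc0b⟩ := hb5
    have hno : c0 ∉ l.foldl stepL l := foldl_stepL_removes l l c0 hc0l hc0b
    have hq : c0 ≠ '\'' := by
      fin_cases hc0b <;> decide
    have m1 : c0 ∉ repSpec ['\''] ['\'', '\''] (l.foldl stepL l) := fun hm => by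
      rcases mem_repSpec _ _ _ _ hm with hx | hx
      · exact hno hx
      · simp at hx; exact hq hx
    have m2 : c0 ∉ repSpec ['-', '-'] [] (repSpec ['\''] ['\'', '\''] (l.foldl stepL l)) :=
      fun hm => by
        rcases mem_repSpec _ _ _ _ hm with hx | hx
        · exact m1 hx
        · simp at hx
    have m3 : c0 ∉ chainL l := fun hm => by
      rw [chainL] at hm
      rcases mem_repSpec _ _ _ _ hm with hx | hx
      · exact m2 hx
      · simp at hx
    intro heq
    rw [heq] at m3
    exact m3 hc0l
  · push_neg at hb5
    have hloop : l.foldl stepL l = l := foldl_stepL_id l l hb5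
    rw [chainL, hloop]
    by_cases hquo : '\'' ∈ l
    · have hk : 0 < l.count '\'' := List.count_pos_iff.mpr hquo
      have c1 : (repSpec ['\''] ['\'', '\''] l).count '\'' = 2 * l.count '\'' := by
        rw [repSpec_singleton]
        exact count_flatMap_double '\'' l
      have c2 : (repSpec ['-', '-'] [] (repSpec ['\''] ['\'', '\''] l)).count '\'' =
          2 * l.count '\'' := by
        rw [count_repSpec_eq _ _ _ _ (by simp) (by decide) (by simp), c1]
      intro heq
      have c3 := count_repSpec_eq ['N', 'U', 'L'] []
        (repSpec ['-', '-'] [] (repSpec ['\''] ['\'', '\''] l)) '\''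
        (by simp) (by decide) (by simp)
      rw [heq, c2] at c3
      omega
    · rw [repSpec_of_not_infix ['\''] ['\'', '\''] l (by rw [List.singleton_infix_iff]; exact hquo)]
      have hfirst : ∀ c ∈ l, c ∉ badSix := by
        intro c hc hmem
        have : c ∈ badFive ∨ c = '\'' := by
          simp only [badSix, badFive, List.mem_cons] at hmem ⊢
          tauto
        rcases this with hx | hx
        · exact hb5 c hc hx
        · exact hquo (hx ▸ hc)
      have hddnul : ['-', '-'] <:+: l ∨ ['N', 'U', 'L'] <:+: l := by tauto
      intro heq
      have hlen := congrArg List.length heq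
      rcases hddnul with hdd | hnul
      · have l1 := length_repSpec_lt ['-', '-'] l (by simp) hdd
        have l2 := length_repSpec_le ['N', 'U', 'L'] (repSpec ['-', '-'] [] l)
        omega
      · by_cases hdd : ['-', '-'] <:+: l
        · have l1 := length_repSpec_lt ['-', '-'] l (by simp) hdd
          have l2 := length_repSpec_le ['N', 'U', 'L'] (repSpec ['-', '-'] [] l)
          omega
        · rw [repSpec_of_not_infix ['-', '-'] [] l hdd] at hlen
          have l1 := length_repSpec_lt ['N', 'U', 'L'] l (by simp) hnul
          omega

-- ===== VERDICT (by name: the statement is the Claim_ definition above) =====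
theorem anti_SQl_injection_spec : Claim_equal_anti_SQl_injection := by
  intro text _
  unfold Spec_anti_SQl_injection
  by_cases hclean : (∀ c ∈ text.toList, c ∉ badSix) ∧
      ¬ (['-', '-'] <:+: text.toList) ∧ ¬ (['N', 'U', 'L'] <:+: text.toList)
  · rw [(A_iff text).mpr (chain_eq _ hclean.1 hclean.2.1 hclean.2.2), (B_iff text).mpr hclean]
  · have hA : anti_SQl_injection text ≠ true :=
      fun h => chain_ne _ hclean ((A_iff text).mp h)
    have hB : anti_SQl_injection_alt text ≠ true :=
      fun h => hclean ((B_iff text).mp h)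
    rw [Bool.eq_false_iff.mpr hA, Bool.eq_false_iff.mpr hB]
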